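-- pv_equiv track=rewrite | github.com/krishnaharki363/PRG200_Assignment_Codes- | Week2_Codes/analyse.py | analyze_numbers
-- ===== SOURCE A (Python) =====
-- def analyze_numbers(n):
--     #Sum of numbers from 1 to n
--     total_sum = sum (range(1, n+1))
--     #Count of even numbers from 1 to n
--     even_count = len([i for i in range(1, n+1) if i % 2 ==0])
--     #Largest Number from 1 to n divisible by 3
--     largest_div_3 = None
--     for i in range(n, 0, -1):
--         if i % 3 == 0:
--             largest_div_3 = i
--             break
--     return total_sum, even_count, largest_div_3
-- ===== SOURCE B (Python) =====
-- def analyze_numbers(n):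
--     if n < 1:
--         return 0, 0, None
--     total_sum = n * (n + 1) // 2
--     even_count = n // 2
--     largest_div_3 = n - n % 3 if n >= 3 else None
--     return total_sum, even_count, largest_div_3
-- ===== Notes on version B (the rewrite author's own statement) =====
-- stated objective: faster
-- what changed: Replaced the three O(n) range traversals (sum, even filter, downward divisibility search) by closed-form arithmetic: triangular-number sum, half count, and n minus its remainder modulo three (None when no positive multiple exists).
import Mathlib
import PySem

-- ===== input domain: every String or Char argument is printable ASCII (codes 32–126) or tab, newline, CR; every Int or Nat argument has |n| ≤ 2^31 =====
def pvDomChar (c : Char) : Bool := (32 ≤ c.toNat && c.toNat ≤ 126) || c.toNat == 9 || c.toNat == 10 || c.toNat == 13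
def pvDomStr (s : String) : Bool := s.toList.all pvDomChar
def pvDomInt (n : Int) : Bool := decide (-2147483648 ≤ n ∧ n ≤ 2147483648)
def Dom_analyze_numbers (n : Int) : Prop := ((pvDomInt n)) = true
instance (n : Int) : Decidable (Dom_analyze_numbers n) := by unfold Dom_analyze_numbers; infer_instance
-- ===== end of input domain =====

-- B replaces A's three O(n) range scans by closed-form arithmetic (objective: faster).

-- ===== PORT A =====
-- the 'for i in range(n, 0, -1): if i % 3 == 0: ... break' loop: first multiple of 3 in the list
def pvFindDiv3 : List Int → Option Int
  | [] => none
  | i :: rest => if PySem.Int.mod i 3 = 0 then some i else pvFindDiv3 rest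

def analyze_numbers (n : Int) : Int × Int × Option Int :=
  let total_sum : Int := (PySem.List.pyRange 1 (n + 1) 1).foldl (· + ·) 0
  let even_count : Int :=
    (((PySem.List.pyRange 1 (n + 1) 1).filter (fun i => PySem.Int.mod i 2 = 0)).length : Int)
  let largest_div_3 : Option Int := pvFindDiv3 (PySem.List.pyRange n 0 (-1))
  (total_sum, even_count, largest_div_3)

-- ===== PORT B =====
def analyze_numbers_alt (n : Int) : Int × Int × Option Int :=
  if n < 1 then (0, 0, none)
  else
    (PySem.Int.floordiv (n * (n + 1)) 2,
     PySem.Int.floordiv n 2,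
     if 3 ≤ n then some (n - PySem.Int.mod n 3) else none)

-- ===== PRECONDITION & SPEC =====
def Spec_analyze_numbers (n : Int) (out : Int × Int × Option Int) : Prop := out = analyze_numbers_alt n
instance (n : Int) (out : Int × Int × Option Int) : Decidable (Spec_analyze_numbers n out) := by unfold Spec_analyze_numbers; infer_instance

-- ===== CLAIM (what is proved, stated in full; the proofs are below) =====
def Claim_equal_analyze_numbers : Prop := ∀ (n : Int), Dom_analyze_numbers n → Spec_analyze_numbers n (analyze_numbers n)

-- ===== LEMMAS AND PROOFS =====

theorem pv_sum_range (m : Nat) :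
    (PySem.List.pyRange 1 ((m : Int) + 1) 1).foldl (· + ·) 0 * 2 = (m : Int) * ((m : Int) + 1) := by
  induction m with
  | zero => simp [PySem.List.pyRange_one_eq_nil]
  | succ k ih =>
      have h : PySem.List.pyRange 1 ((k : Int) + 1 + 1) 1
          = PySem.List.pyRange 1 ((k : Int) + 1) 1 ++ [(k : Int) + 1] :=
        PySem.List.pyRange_one_succ_right (by omega)
      push_cast
      rw [show ((k : Int) + 1 + 1) = ((k : Int) + 1) + 1 by ring, h, List.foldl_append]
      simp only [List.foldl]
      nlinarith [ih]

theorem pv_even_count (m : Nat) :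
    ((((PySem.List.pyRange 1 ((m : Int) + 1) 1).filter
        (fun i => PySem.Int.mod i 2 = 0)).length : Int)) = (m : Int) / 2 := by
  induction m with
  | zero => simp [PySem.List.pyRange_one_eq_nil]
  | succ k ih =>
      have h : PySem.List.pyRange 1 ((k : Int) + 1 + 1) 1
          = PySem.List.pyRange 1 ((k : Int) + 1) 1 ++ [(k : Int) + 1] :=
        PySem.List.pyRange_one_succ_right (by omega)
      push_cast
      rw [show ((k : Int) + 1 + 1) = ((k : Int) + 1) + 1 by ring, h, List.filter_append]
      rw [List.length_append, List.filter_singleton]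
      have hm : PySem.Int.mod ((k : Int) + 1) 2 = ((k : Int) + 1) % 2 :=
        PySem.Int.mod_eq_emod_of_pos (by omega)
      by_cases hp : ((k : Int) + 1) % 2 = 0
      · rw [show (decide (PySem.Int.mod ((k : Int) + 1) 2 = 0)) = true by simp [hp, PySem.Int.mod_eq_emod_of_pos]]
        simp only [Bool.cond_true, List.length_cons, List.length_nil]
        push_cast
        omega
      · rw [show (decide (PySem.Int.mod ((k : Int) + 1) 2 = 0)) = false by simp [hp, PySem.Int.mod_eq_emod_of_pos]]
        simp only [Bool.cond_false, List.length_nil]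
        push_cast
        omega

theorem pv_find_div3 (m : Nat) :
    pvFindDiv3 (PySem.List.pyRange (m : Int) 0 (-1))
      = if 3 ≤ (m : Int) then some ((m : Int) - PySem.Int.mod (m : Int) 3) else none := by
  induction m with
  | zero => simp [PySem.List.pyRange_neg_one_eq_nil, pvFindDiv3]
  | succ k ih =>
      have h : PySem.List.pyRange ((k : Int) + 1) 0 (-1)
          = ((k : Int) + 1) :: PySem.List.pyRange ((k : Int) + 1 - 1) 0 (-1) :=
        PySem.List.pyRange_neg_one_cons (by omega)
      have hm1 : PySem.Int.mod ((k : Int) + 1) 3 = ((k : Int) + 1) % 3 :=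
        PySem.Int.mod_eq_emod_of_pos (by omega)
      have hm2 : PySem.Int.mod (k : Int) 3 = (k : Int) % 3 :=
        PySem.Int.mod_eq_emod_of_pos (by omega)
      push_cast
      rw [h, show ((k : Int) + 1 - 1) = (k : Int) by ring]
      unfold pvFindDiv3
      rw [hm1]
      rw [hm2] at ih
      by_cases hp : ((k : Int) + 1) % 3 = 0
      · have h3 : (3 : Int) ≤ (k : Int) + 1 := by omega
        rw [if_pos hp, if_pos h3]
        simp only [Option.some.injEq]
        omega
      · rw [if_neg hp, ih]
        by_cases h3 : (3 : Int) ≤ (k : Int)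
        · rw [if_pos h3, if_pos (by omega : (3 : Int) ≤ (k : Int) + 1)]
          simp only [Option.some.injEq]
          omega
        · rw [if_neg h3, if_neg (by omega : ¬ (3 : Int) ≤ (k : Int) + 1)]

theorem analyze_numbers_eq (n : Int) : analyze_numbers n = analyze_numbers_alt n := by
  unfold analyze_numbers analyze_numbers_alt
  by_cases hn : n < 1
  · rw [PySem.List.pyRange_one_eq_nil (by omega), PySem.List.pyRange_neg_one_eq_nil (by omega)]
    simp [hn, pvFindDiv3]
  · replace hn : 1 ≤ n := by omega
    obtain ⟨m, rfl⟩ : ∃ m : Nat, n = (m : Int) := ⟨n.toNat, by omega⟩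
    have hsum := pv_sum_range m
    have heven := pv_even_count m
    have hdiv := pv_find_div3 m
    have hfd : PySem.Int.floordiv ((m : Int) * ((m : Int) + 1)) 2
        = (PySem.List.pyRange 1 ((m : Int) + 1) 1).foldl (· + ·) 0 := by
      rw [← hsum, PySem.Int.floordiv_eq_ediv_of_pos (by omega)]
      omega
    have hfd2 : PySem.Int.floordiv (m : Int) 2 = (m : Int) / 2 :=
      PySem.Int.floordiv_eq_ediv_of_pos (by omega)
    simp only [hfd, hfd2, heven, hdiv]
    simp [show ¬ ((m : Int) < 1) by omega]

-- ===== VERDICT (by name: the statement is the Claim_ definition above) =====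
theorem analyze_numbers_spec : Claim_equal_analyze_numbers := by
  intro n _
  exact analyze_numbers_eq n
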